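-- pv_equiv track=rewrite | github.com/bewest/rag-nightscout-ecosystem-alignment | tools/cgmencode/exp_meal_response_2151.py | get_profile_value
-- ===== SOURCE A (Python) =====
-- def get_profile_value(schedule, hour):
--     """Get profile value for a given hour from list-of-dicts schedule."""
--     if not schedule:
--         return None
--     sorted_sched = sorted(schedule, key=lambda x: x.get('timeAsSeconds', 0))
--     result = sorted_sched[0].get('value', None)
--     target_seconds = hour * 3600
--     for entry in sorted_sched:
--         if entry.get('timeAsSeconds', 0) <= target_seconds:
--             result = entry.get('value', result)
--     return result
-- ===== SOURCE B (Python) =====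
-- def get_profile_value(schedule, hour):
--     """Get profile value for a given hour from list-of-dicts schedule (single pass, no sorting)."""
--     if not schedule:
--         return None
--     target_seconds = hour * 3600
--     first = None     # entry with the strictly smallest time, earliest occurrence
--     first_t = None
--     best = None      # entry with the largest time <= target that has 'value'; ties -> latest occurrence
--     best_t = None
--     for entry in schedule:
--         t = entry.get('timeAsSeconds', 0)
--         if first is None or t < first_t:
--             first = entry
--             first_t = t
--         if t <= target_seconds and (best is None or best_t <= t) and 'value' in entry:
--             best = entry
--             best_t = t
--     if best is not None:
--         return best['value']
--     return first.get('value')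
-- ===== Notes on version B (the rewrite author's own statement) =====
-- stated objective: alternative
-- what changed: B replaces A's sort-then-scan with a single linear pass that tracks the min-time entry (the default) and the latest entry having a 'value' key with the largest time <= target, reproducing the stable-sort tie-breaking without sorting.
import Mathlib
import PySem

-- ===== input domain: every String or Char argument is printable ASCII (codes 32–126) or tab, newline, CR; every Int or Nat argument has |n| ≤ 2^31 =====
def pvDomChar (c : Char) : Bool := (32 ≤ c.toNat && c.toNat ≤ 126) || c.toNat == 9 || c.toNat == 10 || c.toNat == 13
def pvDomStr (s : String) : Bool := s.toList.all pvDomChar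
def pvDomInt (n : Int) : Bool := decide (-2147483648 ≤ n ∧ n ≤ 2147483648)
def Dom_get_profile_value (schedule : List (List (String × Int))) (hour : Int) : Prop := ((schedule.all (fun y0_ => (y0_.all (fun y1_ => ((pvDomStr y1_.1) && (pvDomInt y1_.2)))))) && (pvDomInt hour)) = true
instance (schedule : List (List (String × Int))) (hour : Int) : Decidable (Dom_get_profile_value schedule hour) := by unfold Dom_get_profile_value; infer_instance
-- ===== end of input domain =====

-- B replaces A's sort-then-scan with a single linear pass that tracks the min-time entry
-- (A's default) and the latest entry with the largest time ≤ target that carries a 'value'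
-- key, reproducing the stable sort's tie-breaking without sorting.

-- ===== PORT A =====
def get_profile_value (schedule : List (List (String × Int))) (hour : Int) : Option Int :=
  if schedule = [] then none
  else
    let sorted_sched := PySem.List.sorted schedule (fun x => PySem.Dict.getD ⟨x⟩ "timeAsSeconds" 0)
    -- sorted_sched[0]: nonempty here (schedule ≠ []), ported as a match
    let result := match sorted_sched with
      | [] => none
      | h :: _ => PySem.Dict.get? ⟨h⟩ "value"
    let target_seconds := hour * 3600
    sorted_sched.foldl (fun result entry =>
      if PySem.Dict.getD ⟨entry⟩ "timeAsSeconds" 0 ≤ target_seconds then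
        match PySem.Dict.get? ⟨entry⟩ "value" with
        | some v => some v
        | none => result
      else result) result

-- ===== PORT B =====
def get_profile_value_alt (schedule : List (List (String × Int))) (hour : Int) : Option Int :=
  if schedule = [] then none
  else
    let target_seconds := hour * 3600
    let st := schedule.foldl
      (fun (st : Option (List (String × Int) × Int) × Option (List (String × Int) × Int)) entry =>
        let t := PySem.Dict.getD ⟨entry⟩ "timeAsSeconds" 0
        let first := match st.1 with
          | none => some (entry, t)
          | some (f, ft) => if t < ft then some (entry, t) else some (f, ft)
        let best := if (decide (t ≤ target_seconds) &&
                        (match st.2 with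
                         | none => true
                         | some (_, bt) => decide (bt ≤ t)) &&
                        (PySem.Dict.get? ⟨entry⟩ "value").isSome) = true
                    then some (entry, t) else st.2
        (first, best))
      (none, none)
    match st.2 with
    | some (b, _) => PySem.Dict.get? ⟨b⟩ "value"      -- best['value']: present by the loop's guard
    | none =>
      match st.1 with
      | some (f, _) => PySem.Dict.get? ⟨f⟩ "value"
      | none => none

-- ===== PRECONDITION & SPEC =====
def Spec_get_profile_value (schedule : List (List (String × Int))) (hour : Int) (out : Option Int) : Prop := out = get_profile_value_alt schedule hour
instance (schedule : List (List (String × Int))) (hour : Int) (out : Option Int) : Decidable (Spec_get_profile_value schedule hour out) := by unfold Spec_get_profile_value; infer_instance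

-- ===== CLAIM (what is proved, stated in full; the proofs are below) =====
def Claim_equal_get_profile_value : Prop := ∀ (schedule : List (List (String × Int))) (hour : Int), Dom_get_profile_value schedule hour → Spec_get_profile_value schedule hour (get_profile_value schedule hour)

-- ===== LEMMAS AND PROOFS =====

-- abbreviations for the two dict lookups both programs make
def pvK (e : List (String × Int)) : Int := PySem.Dict.getD ⟨e⟩ "timeAsSeconds" 0
def pvV (e : List (String × Int)) : Option Int := PySem.Dict.get? ⟨e⟩ "value"
-- "entry matters to A's loop": time ≤ target and a 'value' key is present
def pvPr (T : Int) (e : List (String × Int)) : Bool := decide (pvK e ≤ T) && (pvV e).isSome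
-- A's loop body and B's loop body as named functions
def pvStepA (T : Int) (r : Option Int) (e : List (String × Int)) : Option Int :=
  if pvK e ≤ T then
    match pvV e with
    | some v => some v
    | none => r
  else r
def pvStepB (T : Int)
    (st : Option (List (String × Int) × Int) × Option (List (String × Int) × Int))
    (e : List (String × Int)) :
    Option (List (String × Int) × Int) × Option (List (String × Int) × Int) :=
  let t := pvK e
  let first := match st.1 with
    | none => some (e, t)
    | some (f, ft) => if t < ft then some (e, t) else some (f, ft)
  let best := if (decide (t ≤ T) &&
                  (match st.2 with
                   | none => true
                   | some (_, bt) => decide (bt ≤ t)) &&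
                  (pvV e).isSome) = true
              then some (e, t) else st.2
  (first, best)

theorem pvPr_iff (T : Int) (e : List (String × Int)) :
    pvPr T e = true ↔ pvK e ≤ T ∧ (pvV e).isSome = true := by
  simp [pvPr]

-- A's fold over any list returns the value of the LAST entry satisfying pvPr, else the seed
theorem pvFoldA_eq (T : Int) (l : List (List (String × Int))) (r : Option Int) :
    l.foldl (pvStepA T) r =
      match l.reverse.find? (pvPr T) with
      | some e => pvV e
      | none => r := by
  induction l generalizing r with
  | nil => rfl
  | cons e l ih =>
    simp only [List.foldl_cons, ih, List.reverse_cons, List.find?_append]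
    cases hf : l.reverse.find? (pvPr T) with
    | some e' => simp [Option.or]
    | none =>
      simp only [Option.or, List.find?]
      by_cases hp : pvPr T e = true
      · rw [hp]
        have h1 : pvK e ≤ T := ((pvPr_iff T e).1 hp).1
        have h2 : (pvV e).isSome = true := ((pvPr_iff T e).1 hp).2
        cases hv : pvV e with
        | some v => simp [pvStepA, h1, hv]
        | none => rw [hv] at h2; simp at h2
      · rw [Bool.not_eq_true] at hp
        rw [hp]
        rw [← Bool.not_eq_true, pvPr_iff, not_and] at hp
        by_cases hk : pvK e ≤ T
        · cases hv : pvV e with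
          | some v => exact absurd (by simp [hv]) (hp hk)
          | none => simp [pvStepA, hk, hv]
        · simp [pvStepA, hk]

-- head of a stable insertion into any list
theorem pvInsert_head (x : List (String × Int)) (ss : List (List (String × Int))) :
    (PySem.List.insertBy (fun a b => decide (pvK a < pvK b)) x ss).head? =
      some (match ss with
            | [] => x
            | y :: _ => if pvK x < pvK y then x else y) := by
  cases ss with
  | nil => rfl
  | cons y ys =>
    by_cases h : pvK x < pvK y
    · simp [PySem.List.insertBy, h]
    · simp [PySem.List.insertBy, h]

-- last pvPr-match after a stable insertion into a key-sorted list
theorem pvInsert_find (T : Int) (x : List (String × Int)) (ss : List (List (String × Int)))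
    (hs : ss.Pairwise (fun a b => pvK a ≤ pvK b)) :
    (PySem.List.insertBy (fun a b => decide (pvK a < pvK b)) x ss).reverse.find? (pvPr T) =
      if pvPr T x then
        match ss.reverse.find? (pvPr T) with
        | some e => if pvK x < pvK e then some e else some x
        | none => some x
      else ss.reverse.find? (pvPr T) := by
  induction ss with
  | nil =>
    simp only [PySem.List.insertBy, List.reverse_nil, List.reverse_cons, List.nil_append,
      List.find?]
    cases hp : pvPr T x <;> simp
  | cons y ys ih =>
    have hy : ∀ e ∈ ys, pvK y ≤ pvK e := (List.pairwise_cons.1 hs).1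
    have hys : ys.Pairwise (fun a b => pvK a ≤ pvK b) := (List.pairwise_cons.1 hs).2
    by_cases hxy : pvK x < pvK y
    · -- insertBy puts x in front
      have hins : PySem.List.insertBy (fun a b => decide (pvK a < pvK b)) x (y :: ys) =
          x :: y :: ys := by simp [PySem.List.insertBy, hxy]
      rw [hins]
      simp only [List.reverse_cons, List.find?_append]
      cases hp : pvPr T x with
      | false =>
        cases ys.reverse.find? (pvPr T) <;> cases hgy : pvPr T y <;>
          simp [List.find?, hp, hgy, Option.or]
      | true =>
        cases hF : ys.reverse.find? (pvPr T) with
        | some e =>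
          have hke : pvK x < pvK e := by
            have he : e ∈ ys := by
              have := List.mem_of_find?_eq_some hF; simpa using this
            exact lt_of_lt_of_le hxy (hy e he)
          simp [List.find?, hp, Option.or, hke]
        | none =>
          cases hgy : pvPr T y with
          | true => simp [List.find?, hp, hgy, Option.or, hxy]
          | false => simp [List.find?, hp, hgy, Option.or]
    · -- insertBy recurses into ys
      have hins : PySem.List.insertBy (fun a b => decide (pvK a < pvK b)) x (y :: ys) =
          y :: PySem.List.insertBy (fun a b => decide (pvK a < pvK b)) x ys := by
        simp [PySem.List.insertBy, hxy]
      rw [hins]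
      simp only [List.reverse_cons, List.find?_append, ih hys]
      cases hp : pvPr T x with
      | false => simp
      | true =>
        cases hF : ys.reverse.find? (pvPr T) with
        | some e =>
          by_cases hke : pvK x < pvK e <;> simp [hke, Option.or]
        | none =>
          cases hgy : pvPr T y with
          | true => simp [List.find?, hgy, Option.or, hxy]
          | false => simp [List.find?, hgy, Option.or]

-- appending one element to the input inserts it (stably) into the sorted list
theorem pvSorted_append (l : List (List (String × Int))) (x : List (String × Int)) :
    PySem.List.sorted (l ++ [x]) (fun e => pvK e) =
      PySem.List.insertBy (fun a b => decide (pvK a < pvK b)) x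
        (PySem.List.sorted l (fun e => pvK e)) := by
  rw [PySem.List.sorted_eq_foldl_insertBy, PySem.List.sorted_eq_foldl_insertBy,
    List.foldl_append]
  rfl

-- B's single pass computes exactly (head of A's sorted list, last pvPr-match of A's sorted list),
-- each paired with its cached time
theorem pvInvariant (T : Int) (l : List (List (String × Int))) :
    l.foldl (pvStepB T) (none, none) =
      ((PySem.List.sorted l (fun e => pvK e)).head?.map (fun e => (e, pvK e)),
       ((PySem.List.sorted l (fun e => pvK e)).reverse.find? (pvPr T)).map (fun e => (e, pvK e))) := by
  induction l using List.reverseRecOn with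
  | nil => rfl
  | append_singleton l x ih =>
    rw [List.foldl_append, ih, pvSorted_append]
    have hpw : (PySem.List.sorted l (fun e => pvK e)).Pairwise (fun a b => pvK a ≤ pvK b) :=
      PySem.List.sorted_pairwise l (fun e => pvK e)
    rw [List.foldl_cons, List.foldl_nil]
    rw [pvInsert_head, pvInsert_find T x _ hpw]
    unfold pvStepB
    cases hss : PySem.List.sorted l (fun e => pvK e) with
    | nil =>
      simp only [List.head?, List.reverse_nil, List.find?, Option.map_none, Option.map_some]
      by_cases hp : pvPr T x = true
      · have h1 : pvK x ≤ T := ((pvPr_iff T x).1 hp).1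
        have h2 : (pvV x).isSome = true := ((pvPr_iff T x).1 hp).2
        simp [hp, h1, h2]
      · rw [Bool.not_eq_true] at hp
        simp [hp]
        intro hk
        cases hvv : pvV x with
        | none => rfl
        | some v => exact absurd ((pvPr_iff T x).2 ⟨hk, by simp [hvv]⟩) (by simp [hp])
    | cons h t =>
      simp only [List.head?, Option.map_some]
      congr 1
      · by_cases hlt : pvK x < pvK h <;> simp [hlt]
      · by_cases hp : pvPr T x = true
        · have h1 : pvK x ≤ T := ((pvPr_iff T x).1 hp).1
          have h2 : (pvV x).isSome = true := ((pvPr_iff T x).1 hp).2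
          rw [hp]
          cases hf : (h :: t).reverse.find? (pvPr T) with
          | some e =>
            by_cases hke : pvK x < pvK e
            · have hc : (decide (pvK x ≤ T) && decide (pvK e ≤ pvK x) && (pvV x).isSome) = false := by
                simp [not_le.2 hke]
              simp [hc, hke]
            · have hc : (decide (pvK x ≤ T) && decide (pvK e ≤ pvK x) && (pvV x).isSome) = true := by
                simp [h1, h2, not_lt.1 hke]
              simp [hc, hke]
          | none => simp [h1, h2]
        · rw [Bool.not_eq_true] at hp; rw [hp]
          have hv_of : ∀ (c : Bool), (decide (pvK x ≤ T) && c && (pvV x).isSome) = false := by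
            intro c
            by_cases hk : pvK x ≤ T
            · have hv : (pvV x).isSome = false := by
                cases hvv : (pvV x).isSome
                · rfl
                · exact absurd ((pvPr_iff T x).2 ⟨hk, hvv⟩) (by simp [hp])
              simp [hv]
            · simp [hk]
          cases hf : (h :: t).reverse.find? (pvPr T) with
          | some e => simp [hv_of]
          | none =>
            simp
            intro hk
            cases hvv : pvV x with
            | none => rfl
            | some v => exact absurd ((pvPr_iff T x).2 ⟨hk, by simp [hvv]⟩) (by simp [hp])

theorem pvMain (schedule : List (List (String × Int))) (hour : Int) :
    get_profile_value schedule hour = get_profile_value_alt schedule hour := by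
  unfold get_profile_value get_profile_value_alt
  by_cases hne : schedule = []
  · simp [hne]
  · simp only [if_neg hne]
    have hfoldA := pvFoldA_eq (hour * 3600)
      (PySem.List.sorted schedule (fun e => pvK e))
    have hinv := pvInvariant (hour * 3600) schedule
    -- identify the ports' lambdas with pvStepA / pvStepB
    show (PySem.List.sorted schedule (fun e => pvK e)).foldl (pvStepA (hour * 3600))
        (match PySem.List.sorted schedule (fun e => pvK e) with
         | [] => none
         | h :: _ => pvV h) =
      (match (schedule.foldl (pvStepB (hour * 3600)) (none, none)).2 with
       | some (b, _) => pvV b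
       | none =>
         match (schedule.foldl (pvStepB (hour * 3600)) (none, none)).1 with
         | some (f, _) => pvV f
         | none => none)
    rw [hinv, hfoldA]
    obtain ⟨h, t, hss⟩ : ∃ h t, PySem.List.sorted schedule (fun e => pvK e) = h :: t := by
      cases hq : PySem.List.sorted schedule (fun e => pvK e) with
      | nil => exact absurd ((PySem.List.sorted_eq_nil_iff _ _ _).1 hq) hne
      | cons a b => exact ⟨a, b, rfl⟩
    rw [hss]
    cases (h :: t).reverse.find? (pvPr (hour * 3600)) with
    | some e => rfl
    | none => rfl

-- ===== VERDICT (by name: the statement is the Claim_ definition above) =====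
theorem get_profile_value_spec : Claim_equal_get_profile_value := by
  intro schedule hour _
  unfold Spec_get_profile_value
  exact pvMain schedule hour
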